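-- pv_equiv track=rewrite | github.com/pypi-data/pypi-mirror-398 | packages/mbake/mbake-1.4.4.tar.gz/mbake-1.4.4/mbake/core/rules/phony.py | _extract_phony_targets
-- ===== SOURCE A (Python) =====
-- def _extract_phony_targets(lines: list[str]) -> list[str]:
--     """Extract targets from existing .PHONY declarations."""
--     phony_targets = []
--     seen_targets = set()
--
--     for line in lines:
--         stripped = line.strip()
--         if stripped.startswith(".PHONY:"):
--             content = stripped[7:].strip()
--             if content.endswith("\\"):
--                 content = content[:-1].strip()
--             targets = [t.strip() for t in content.split() if t.strip()]
--             for target in targets: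
--                 if target not in seen_targets:
--                     phony_targets.append(target)
--                     seen_targets.add(target)
--
--     return phony_targets
-- ===== SOURCE B (Python) =====
-- def _phony_line_targets(line):
--     """Targets declared on one line, or [] if it is not a .PHONY line."""
--     stripped = line.strip()
--     if not stripped.startswith(".PHONY:"):
--         return []
--     content = stripped[7:].strip()
--     if content.endswith("\\"):
--         content = content[:-1].strip()
--     return content.split()
--
-- def _extract_phony_targets(lines):
--     """Extract targets from existing .PHONY declarations."""
--     tokens = [t for line in lines for t in _phony_line_targets(line)]
--     # Selection-style dedup: repeatedly take the first remaining token and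
--     # filter every later copy of it out of the stream (no seen-set is kept).
--     result = []
--     while tokens:
--         head = tokens[0]
--         result.append(head)
--         tokens = [t for t in tokens[1:] if t != head]
--     return result
-- ===== Notes on version B (the rewrite author's own statement) =====
-- stated objective: alternative
-- what changed: B first flat-collects every .PHONY token via a per-line helper, then deduplicates by a selection pass that repeatedly emits the first remaining token and filters all its later copies out of the stream, instead of A's single interleaved loop with a seen-set.
import Mathlib
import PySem

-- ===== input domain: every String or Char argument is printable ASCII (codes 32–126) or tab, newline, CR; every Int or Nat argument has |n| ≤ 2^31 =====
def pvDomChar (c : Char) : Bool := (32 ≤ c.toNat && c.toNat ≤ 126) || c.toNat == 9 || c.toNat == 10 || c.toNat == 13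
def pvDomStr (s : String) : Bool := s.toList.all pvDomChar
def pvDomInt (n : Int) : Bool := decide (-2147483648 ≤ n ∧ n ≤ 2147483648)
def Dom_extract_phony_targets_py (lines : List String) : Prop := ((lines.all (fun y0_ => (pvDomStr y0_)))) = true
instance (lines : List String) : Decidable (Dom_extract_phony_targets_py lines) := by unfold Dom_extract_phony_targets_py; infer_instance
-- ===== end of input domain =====

-- B change (objective: alternative): B flat-collects the .PHONY tokens per line and
-- then dedups by selection — repeatedly emit the first remaining token and filter
-- its later copies out of the stream — instead of A's interleaved seen-set loop.

-- ===== PORT A =====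
-- literal transliteration of A: fold over lines carrying (phony_targets, seen_targets)
def phonyStepA (st : List String × PySem.Set String) (line : String) :
    List String × PySem.Set String :=
  let stripped := PySem.Str.strip line
  if PySem.Str.startswith stripped ".PHONY:" then
    let content := PySem.Str.strip (PySem.Str.slice stripped (some 7) none)
    let content := if PySem.Str.endswith content "\\" then
        PySem.Str.strip (PySem.Str.slice content none (some (-1)))
      else content
    let targets := ((PySem.Str.split₀ content).filter
        (fun t => PySem.Str.strip t != "")).map (fun t => PySem.Str.strip t)
    targets.foldl (fun st2 target =>
      if ¬ PySem.Set.contains st2.2 target then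
        (st2.1 ++ [target], PySem.Set.add st2.2 target)
      else st2) st
  else st

def extract_phony_targets_py (lines : List String) : List String :=
  (lines.foldl phonyStepA ([], PySem.Set.empty)).1

-- ===== PORT B =====
def phonyLineTargets (line : String) : List String :=
  let stripped := PySem.Str.strip line
  if ¬ PySem.Str.startswith stripped ".PHONY:" then []
  else
    let content := PySem.Str.strip (PySem.Str.slice stripped (some 7) none)
    let content := if PySem.Str.endswith content "\\" then
        PySem.Str.strip (PySem.Str.slice content none (some (-1)))
      else content
    PySem.Str.split₀ content

-- B's selection dedup: emit the head, filter its copies out of the rest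
def selectDedup (tokens : List String) : List String :=
  match tokens with
  | [] => []
  | head :: rest => head :: selectDedup (rest.filter (fun t => t != head))
termination_by tokens.length
decreasing_by
  simp only [List.length_unattach]
  exact Nat.lt_succ_of_le ((List.length_filter_le _ _).trans (by simp))

def extract_phony_targets_py_alt (lines : List String) : List String :=
  selectDedup (lines.flatMap phonyLineTargets)

-- ===== PRECONDITION & SPEC =====
def Spec_extract_phony_targets_py (lines : List String) (out : List String) : Prop := out = extract_phony_targets_py_alt lines
instance (lines : List String) (out : List String) : Decidable (Spec_extract_phony_targets_py lines out) := by unfold Spec_extract_phony_targets_py; infer_instance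

-- ===== CLAIM (what is proved, stated in full; the proofs are below) =====
def Claim_equal_extract_phony_targets_py : Prop := ∀ (lines : List String), Dom_extract_phony_targets_py lines → Spec_extract_phony_targets_py lines (extract_phony_targets_py lines)

-- ===== LEMMAS AND PROOFS =====

-- every word produced by Chars.split₀.go is nonempty and contains no whitespace
theorem split₀_go_words (s : List Char) : ∀ (cur : List Char) (acc : List (List Char)),
    (∀ c ∈ cur, PySem.Chars.isspace c = false) →
    (∀ w ∈ acc, w ≠ [] ∧ ∀ c ∈ w, PySem.Chars.isspace c = false) →
    ∀ w ∈ PySem.Chars.split₀.go s cur acc, w ≠ [] ∧ ∀ c ∈ w, PySem.Chars.isspace c = false := by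
  induction s with
  | nil =>
    intro cur acc hcur hacc w hw
    simp only [PySem.Chars.split₀.go] at hw
    by_cases h : cur.isEmpty
    · simp [h] at hw; exact hacc w hw
    · simp [h] at hw
      rcases hw with h1 | h2
      · exact hacc w h1
      · subst h2
        refine ⟨by simpa [List.isEmpty_iff] using h, ?_⟩
        intro c hc; exact hcur c (List.mem_reverse.mp hc)
  | cons c rest ih =>
    intro cur acc hcur hacc w hw
    simp only [PySem.Chars.split₀.go] at hw
    by_cases hs : PySem.Chars.isspace c
    · by_cases he : cur.isEmpty
      · simp [hs, he] at hw
        exact ih [] acc (by simp) hacc w hw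
      · simp [hs, he] at hw
        refine ih [] (cur.reverse :: acc) (by simp) ?_ w hw
        intro v hv
        rcases List.mem_cons.mp hv with h1 | h2
        · subst h1
          refine ⟨by simpa [List.isEmpty_iff] using he, ?_⟩
          intro d hd; exact hcur d (List.mem_reverse.mp hd)
        · exact hacc v h2
    · simp [hs] at hw
      refine ih (c :: cur) acc ?_ hacc w hw
      intro d hd
      rcases List.mem_cons.mp hd with h1 | h2
      · subst h1; simpa using hs
      · exact hcur d h2

theorem split₀_words (s : List Char) :
    ∀ w ∈ PySem.Chars.split₀ s, w ≠ [] ∧ ∀ c ∈ w, PySem.Chars.isspace c = false := by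
  intro w hw
  exact split₀_go_words s [] [] (by simp) (by simp) w hw

theorem dropWhile_eq_self_of_all {p : Char → Bool} {l : List Char}
    (h : ∀ c ∈ l, p c = false) : l.dropWhile p = l := by
  cases l with
  | nil => rfl
  | cons c rest => simp [List.dropWhile, h c (by simp)]

theorem strip_no_space {w : List Char} (h : ∀ c ∈ w, PySem.Chars.isspace c = false) :
    PySem.Chars.strip w = w := by
  unfold PySem.Chars.strip PySem.Chars.lstrip PySem.Chars.rstrip
  rw [dropWhile_eq_self_of_all h, dropWhile_eq_self_of_all, List.reverse_reverse]
  intro c hc; exact h c (List.mem_reverse.mp hc)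

-- A's redundant re-strip/filter of content.split() is the identity
theorem targetsA_eq_split₀ (content : String) :
    ((PySem.Str.split₀ content).filter (fun t => PySem.Str.strip t != "")).map
      (fun t => PySem.Str.strip t) = PySem.Str.split₀ content := by
  have key : ∀ t ∈ PySem.Str.split₀ content, PySem.Str.strip t = t ∧ t ≠ "" := by
    intro t ht
    simp only [PySem.Str.split₀, List.mem_map] at ht
    obtain ⟨w, hw, rfl⟩ := ht
    obtain ⟨hne, hns⟩ := split₀_words content.toList w hw
    have htl : (String.ofList w).toList = w := by simp
    constructor
    · show String.ofList ((String.ofList w).toList |> PySem.Chars.strip) = String.ofList w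
      rw [htl, strip_no_space hns]
    · intro hcon
      apply hne
      have := congrArg String.toList hcon
      rw [htl] at this
      simpa using this
  have hfilter : (PySem.Str.split₀ content).filter (fun t => PySem.Str.strip t != "")
      = PySem.Str.split₀ content := by
    apply List.filter_eq_self.mpr
    intro t ht
    simp only [bne_iff_ne, ne_eq]
    intro hcon
    obtain ⟨h1, h2⟩ := key t ht
    rw [h1] at hcon; exact h2 hcon
  have hmap : (PySem.Str.split₀ content).map (fun t => PySem.Str.strip t)
      = (PySem.Str.split₀ content).map id :=
    List.map_congr_left (fun t ht => (key t ht).1)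
  rw [hfilter, hmap, List.map_id]

-- A's inner loop on a diagonal state is foldl Set.add on both components
theorem inner_fold_diag (ts : List String) : ∀ (s : PySem.Set String),
    (ts.foldl (fun st2 target =>
      if ¬ PySem.Set.contains st2.2 target then
        (st2.1 ++ [target], PySem.Set.add st2.2 target)
      else st2) (s, s)) = (ts.foldl PySem.Set.add s, ts.foldl PySem.Set.add s) := by
  induction ts with
  | nil => intro s; rfl
  | cons t rest ih =>
    intro s
    have hstep : (if ¬ PySem.Set.contains s t then
        (s ++ [t], PySem.Set.add s t) else ((s, s) : List String × PySem.Set String))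
        = (PySem.Set.add s t, PySem.Set.add s t) := by
      by_cases h : t ∈ s <;> simp [h, PySem.Set.add, PySem.Set.contains]
    simp only [List.foldl_cons, hstep, ih]

-- the outer fold computes foldl Set.add over B's flat target list
theorem outer_fold (lines : List String) : ∀ (s : PySem.Set String),
    lines.foldl phonyStepA (s, s)
      = ((lines.flatMap phonyLineTargets).foldl PySem.Set.add s,
         (lines.flatMap phonyLineTargets).foldl PySem.Set.add s) := by
  induction lines with
  | nil => intro s; simp
  | cons line rest ih =>
    intro s
    have hline : phonyStepA (s, s) line
        = ((phonyLineTargets line).foldl PySem.Set.add s,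
           (phonyLineTargets line).foldl PySem.Set.add s) := by
      simp only [phonyStepA, phonyLineTargets]
      by_cases h : PySem.Str.startswith (PySem.Str.strip line) ".PHONY:"
      · simp only [h, if_true, not_true, if_false, targetsA_eq_split₀, inner_fold_diag]
      · rw [if_neg h, if_pos h]
        rfl
    simp only [List.foldl_cons, List.flatMap_cons, List.foldl_append, hline, ih]

-- adding an element already in the set is a no-op throughout a fold: the fold
-- over l equals the fold over l with every copy of x filtered out
theorem foldl_add_filter (l : List String) : ∀ (s : PySem.Set String) (x : String), x ∈ s →
    l.foldl PySem.Set.add s = (l.filter (fun a => a != x)).foldl PySem.Set.add s := by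
  induction l with
  | nil => intro s x _; rfl
  | cons a l ih =>
    intro s x hx
    by_cases hax : a = x
    · subst hax
      have : PySem.Set.add s a = s := by simp [PySem.Set.add, PySem.Set.contains, hx]
      simp [this, ih s a hx]
    · have hmem : x ∈ PySem.Set.add s a := by
        simp [PySem.Set.add, PySem.Set.contains]; split <;> simp [hx]
      simp [bne_iff_ne, hax, ih _ x hmem]

-- a head element absent from the rest of the fold input stays at the head
theorem foldl_add_cons_head (l : List String) : ∀ (s : PySem.Set String) (h : String),
    h ∉ l → l.foldl PySem.Set.add (h :: s) = h :: l.foldl PySem.Set.add s := by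
  induction l with
  | nil => intro s h _; rfl
  | cons a l ih =>
    intro s h hnl
    have hah : a ≠ h := fun he => hnl (by simp [he])
    have hstep : PySem.Set.add (h :: s) a = h :: PySem.Set.add s a := by
      simp [PySem.Set.add, PySem.Set.contains, hah]
      split <;> simp
    rw [List.foldl_cons, hstep, List.foldl_cons,
        ih _ h (fun hm => hnl (List.mem_cons_of_mem a hm))]

-- the seen-set fold from the empty set is exactly B's selection dedup
theorem foldl_add_eq_selectDedup (tokens : List String) :
    tokens.foldl PySem.Set.add PySem.Set.empty = selectDedup tokens := by
  induction hn : tokens.length using Nat.strong_induction_on generalizing tokens with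
  | _ n ih =>
    cases tokens with
    | nil => rw [selectDedup]; rfl
    | cons h t =>
      have hadd : PySem.Set.add PySem.Set.empty h = [h] := rfl
      have hnotin : h ∉ t.filter (fun a => a != h) := by
        simp [List.mem_filter]
      calc (h :: t).foldl PySem.Set.add PySem.Set.empty
          = t.foldl PySem.Set.add [h] := by rw [List.foldl_cons, hadd]
        _ = (t.filter (fun a => a != h)).foldl PySem.Set.add [h] :=
            foldl_add_filter t [h] h (by simp)
        _ = h :: (t.filter (fun a => a != h)).foldl PySem.Set.add PySem.Set.empty :=
            foldl_add_cons_head _ PySem.Set.empty h hnotin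
        _ = h :: selectDedup (t.filter (fun a => a != h)) := by
            rw [ih (t.filter (fun a => a != h)).length
              (by subst hn; exact Nat.lt_succ_of_le (List.length_filter_le _ t)) _ rfl]
        _ = selectDedup (h :: t) := by rw [selectDedup]

-- ===== VERDICT (by name: the statement is the Claim_ definition above) =====
theorem extract_phony_targets_py_spec : Claim_equal_extract_phony_targets_py := by
  intro lines _
  show extract_phony_targets_py lines = extract_phony_targets_py_alt lines
  unfold extract_phony_targets_py extract_phony_targets_py_alt
  rw [show (([], PySem.Set.empty) : List String × PySem.Set String)
        = ((PySem.Set.empty : PySem.Set String), (PySem.Set.empty : PySem.Set String)) from rfl,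
      outer_fold, foldl_add_eq_selectDedup]
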